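-- pv_equiv track=rewrite | github.com/eirikaa/aoc | day1.py | compute_change
-- ===== SOURCE A (Python) =====
-- def compute_change(data):
--     change = {"decrease": 0, "increase": 0, "no_change": 0}
--     for i, record in enumerate(data):
--         if i:
--             if record < prev_record:
--                 change["decrease"] += 1
--             elif record > prev_record:
--                 change["increase"] += 1
--             else:
--                 change["no_change"] += 1
--         prev_record = record
--     return change
-- ===== SOURCE B (Python) =====
-- def compute_change(data):
--     data = list(data)
--     n = len(data)
--     dec = sum(data[i] < data[i - 1] for i in range(1, n))
--     inc = sum(data[i] > data[i - 1] for i in range(1, n))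
--     return {"decrease": dec, "increase": inc, "no_change": max(n - 1, 0) - dec - inc}
-- ===== Notes on version B (the rewrite author's own statement) =====
-- stated objective: alternative
-- what changed: Replaces A's single stateful pass (enumerate, prev_record carry, three-way branch with in-place dict increments) by staged index-based counting passes: dec and inc are each a predicate sum over range(1, n), and no_change is derived arithmetically as max(n-1,0) - dec - inc instead of being counted at all.
import Mathlib
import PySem

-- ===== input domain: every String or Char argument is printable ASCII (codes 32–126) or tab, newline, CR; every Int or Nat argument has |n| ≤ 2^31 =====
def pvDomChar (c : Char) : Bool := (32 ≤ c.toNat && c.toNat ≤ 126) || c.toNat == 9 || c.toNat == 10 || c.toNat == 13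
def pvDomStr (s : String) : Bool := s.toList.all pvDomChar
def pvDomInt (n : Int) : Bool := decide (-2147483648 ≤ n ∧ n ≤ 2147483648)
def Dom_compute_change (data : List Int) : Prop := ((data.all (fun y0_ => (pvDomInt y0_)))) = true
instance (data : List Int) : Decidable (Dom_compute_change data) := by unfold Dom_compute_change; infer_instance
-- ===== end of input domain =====

-- B replaces A's single stateful prev_record pass by staged index-based predicate sums for
-- dec/inc and derives no_change arithmetically as max(n-1,0) - dec - inc (alternative decomposition).

-- ===== PORT A =====
-- A: dict of three zero counts; enumerate loop carrying prev_record; 'if i:' skips the first element.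
-- enumerate is ported as an explicit Int index in the fold state; prev_record as Option Int
-- (none only before the first iteration, where 'if i:' is false, so the 'none' arm is unreachable).
def compute_change (data : List Int) : List (String × Int) :=
  let change : PySem.Dict String Int :=
    ((PySem.Dict.empty.insert "decrease" 0).insert "increase" 0).insert "no_change" 0
  (data.foldl
    (fun (st : PySem.Dict String Int × Int × Option Int) record =>
      let change := st.1
      let i := st.2.1
      let prev := st.2.2
      let change :=
        if i ≠ 0 then
          match prev with
          | some prev_record =>
              if record < prev_record then change.modify "decrease" 0 (· + 1)
              else if record > prev_record then change.modify "increase" 0 (· + 1)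
              else change.modify "no_change" 0 (· + 1)
          | none => change
        else change
      (change, i + 1, some record))
    (change, 0, none)).1.items

-- ===== PORT B =====
-- B: two staged predicate-sum passes over range(1, n) (data[i] vs data[i-1]; indices are always
-- in range, so pyGetD with default 0 is exact here), then no_change by arithmetic.
def compute_change_alt (data : List Int) : List (String × Int) :=
  let n : Int := data.length
  let dec := ((PySem.List.pyRange 1 n 1).map (fun i =>
      if PySem.List.pyGetD data i 0 < PySem.List.pyGetD data (i - 1) 0 then (1 : Int) else 0)).sum
  let inc := ((PySem.List.pyRange 1 n 1).map (fun i =>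
      if PySem.List.pyGetD data i 0 > PySem.List.pyGetD data (i - 1) 0 then (1 : Int) else 0)).sum
  [("decrease", dec), ("increase", inc), ("no_change", max (n - 1) 0 - dec - inc)]

-- ===== PRECONDITION & SPEC =====
def Spec_compute_change (data : List Int) (out : List (String × Int)) : Prop := out = compute_change_alt data
instance (data : List Int) (out : List (String × Int)) : Decidable (Spec_compute_change data out) := by unfold Spec_compute_change; infer_instance

-- ===== CLAIM (what is proved, stated in full; the proofs are below) =====
def Claim_equal_compute_change : Prop := ∀ (data : List Int), Dom_compute_change data → Spec_compute_change data (compute_change data)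

-- ===== LEMMAS AND PROOFS =====

-- the literal three-key dict with given counts
def pvDict3 (d i n : Int) : PySem.Dict String Int :=
  ((PySem.Dict.empty.insert "decrease" d).insert "increase" i).insert "no_change" n

theorem pv_modify_dec (d i n : Int) :
    (pvDict3 d i n).modify "decrease" 0 (· + 1) = pvDict3 (d + 1) i n := by
  simp [pvDict3, PySem.Dict.modify, PySem.Dict.empty, PySem.Dict.insert, PySem.Dict.get?,
        PySem.Dict.getD, PySem.Dict.contains]

theorem pv_modify_inc (d i n : Int) :
    (pvDict3 d i n).modify "increase" 0 (· + 1) = pvDict3 d (i + 1) n := by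
  simp [pvDict3, PySem.Dict.modify, PySem.Dict.empty, PySem.Dict.insert, PySem.Dict.get?,
        PySem.Dict.getD, PySem.Dict.contains]

theorem pv_modify_nc (d i n : Int) :
    (pvDict3 d i n).modify "no_change" 0 (· + 1) = pvDict3 d i (n + 1) := by
  simp [pvDict3, PySem.Dict.modify, PySem.Dict.empty, PySem.Dict.insert, PySem.Dict.get?,
        PySem.Dict.getD, PySem.Dict.contains]

-- abbreviation for A's fold body
def pvStepA (st : PySem.Dict String Int × Int × Option Int) (record : Int) :
    PySem.Dict String Int × Int × Option Int :=
  let change := st.1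
  let i := st.2.1
  let prev := st.2.2
  let change :=
    if i ≠ 0 then
      match prev with
      | some prev_record =>
          if record < prev_record then change.modify "decrease" 0 (· + 1)
          else if record > prev_record then change.modify "increase" 0 (· + 1)
          else change.modify "no_change" 0 (· + 1)
      | none => change
    else change
  (change, i + 1, some record)

-- the three pair predicates (pairs run (prev, cur))
def pvLt (p : Int × Int) : Bool := decide (p.2 < p.1)
def pvGt (p : Int × Int) : Bool := decide (p.2 > p.1)
def pvEq (p : Int × Int) : Bool := decide (p.2 = p.1)

-- A's fold, once started, counts the three pair classes of zip(xs-with-prev, xs)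
theorem pv_main (xs : List Int) (pr : Int) (k d i n : Int) (hk : 0 ≤ k) :
    (xs.foldl pvStepA (pvDict3 d i n, k + 1, some pr)).1 =
      pvDict3 (d + (((pr :: xs).zip xs).countP pvLt : Int))
              (i + (((pr :: xs).zip xs).countP pvGt : Int))
              (n + (((pr :: xs).zip xs).countP pvEq : Int)) := by
  induction xs generalizing pr k d i n with
  | nil => simp
  | cons x rest ih =>
      have hk1 : k + 1 ≠ 0 := by omega
      simp only [List.foldl_cons, List.zip_cons_cons]
      rcases lt_trichotomy x pr with h | h | h
      · have e1 : pvLt (pr, x) = true := by simp [pvLt]; omega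
        have e2 : pvGt (pr, x) = false := by simp [pvGt]; omega
        have e3 : pvEq (pr, x) = false := by simp [pvEq]; omega
        rw [show pvStepA (pvDict3 d i n, k + 1, some pr) x =
              (pvDict3 (d + 1) i n, (k + 1) + 1, some x) by
          simp [pvStepA, hk1, h, pv_modify_dec]]
        rw [ih x (k + 1) (d + 1) i n (by omega)]
        simp only [List.countP_cons, e1, e2, e3, if_true]
        simp [pvDict3, PySem.Dict.insert, PySem.Dict.empty]
        omega
      · have e1 : pvLt (pr, x) = false := by simp [pvLt]; omega
        have e2 : pvGt (pr, x) = false := by simp [pvGt]; omega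
        have e3 : pvEq (pr, x) = true := by simp [pvEq]; omega
        have hn1 : ¬ x < pr := by omega
        have hn2 : ¬ x > pr := by omega
        rw [show pvStepA (pvDict3 d i n, k + 1, some pr) x =
              (pvDict3 d i (n + 1), (k + 1) + 1, some x) by
          simp [pvStepA, hk1, hn1, hn2, pv_modify_nc]]
        rw [ih x (k + 1) d i (n + 1) (by omega)]
        simp only [List.countP_cons, e1, e2, e3, if_true]
        simp [pvDict3, PySem.Dict.insert, PySem.Dict.empty]
        omega
      · have e1 : pvLt (pr, x) = false := by simp [pvLt]; omega
        have e2 : pvGt (pr, x) = true := by simp [pvGt]; omega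
        have e3 : pvEq (pr, x) = false := by simp [pvEq]; omega
        have hn1 : ¬ x < pr := by omega
        rw [show pvStepA (pvDict3 d i n, k + 1, some pr) x =
              (pvDict3 d (i + 1) n, (k + 1) + 1, some x) by
          simp [pvStepA, hk1, hn1, h, pv_modify_inc]]
        rw [ih x (k + 1) d (i + 1) n (by omega)]
        simp only [List.countP_cons, e1, e2, e3, if_true]
        simp [pvDict3, PySem.Dict.insert, PySem.Dict.empty]
        omega

-- B's index-sum over range(1, n) is the 0/1 count over zip(xs, xs.tail)
theorem pv_range_count (xs : List Int) (q : Int → Int → Prop) [DecidableRel q] :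
    ((PySem.List.pyRange 1 (xs.length : Int) 1).map (fun i =>
        if q (PySem.List.pyGetD xs i 0) (PySem.List.pyGetD xs (i - 1) 0) then (1 : Int) else 0)).sum
      = ((xs.zip xs.tail).countP (fun p => decide (q p.2 p.1)) : Int) := by
  have hmap : (PySem.List.pyRange 1 (xs.length : Int) 1).map (fun i =>
        if q (PySem.List.pyGetD xs i 0) (PySem.List.pyGetD xs (i - 1) 0) then (1 : Int) else 0)
      = (xs.zip xs.tail).map (fun p => if q p.2 p.1 then (1 : Int) else 0) := by
    apply List.ext_getElem
    · simp [PySem.List.length_pyRange_one, List.length_zip, List.length_tail]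
    · intro k h1 h2
      have hk : k + 1 < xs.length := by
        have := h1
        rw [List.length_map, PySem.List.length_pyRange_one] at this
        omega
      rw [List.getElem_map, List.getElem_map, PySem.List.getElem_pyRange_one]
      have e1 : (1 : Int) + k = ((k + 1 : Nat) : Int) := by omega
      rw [e1, PySem.List.pyGetD_natCast]
      rw [show ((((k + 1 : Nat)) : Int) - 1) = ((k : Nat) : Int) by omega, PySem.List.pyGetD_natCast]
      rw [List.getD_eq_getElem xs 0 hk, List.getD_eq_getElem xs 0 (by omega)]
      rw [List.getElem_zip]
      simp [List.getElem_tail]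
  rw [hmap]
  rw [show (fun p : Int × Int => if q p.2 p.1 then (1 : Int) else 0)
        = (fun p : Int × Int => if (fun p : Int × Int => decide (q p.2 p.1)) p = true then (1 : Int) else 0) by
      funext p; simp]
  rw [PySem.List.sum_map_ite_one_zero]

-- trichotomy: the three pair classes partition the pairs
theorem pv_tri (ps : List (Int × Int)) :
    ps.countP pvLt + ps.countP pvGt + ps.countP pvEq = ps.length := by
  induction ps with
  | nil => simp
  | cons p rest ih =>
      rw [List.countP_cons, List.countP_cons, List.countP_cons]
      rcases lt_trichotomy p.2 p.1 with h | h | h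
      · have e1 : pvLt p = true := by simp [pvLt, h]
        have e2 : pvGt p = false := by simp [pvGt]; omega
        have e3 : pvEq p = false := by simp [pvEq]; omega
        simp [e1, e2, e3]; omega
      · have e1 : pvLt p = false := by simp [pvLt]; omega
        have e2 : pvGt p = false := by simp [pvGt]; omega
        have e3 : pvEq p = true := by simp [pvEq, h]
        simp [e1, e2, e3]; omega
      · have e1 : pvLt p = false := by simp [pvLt]; omega
        have e2 : pvGt p = true := by simp [pvGt, h]
        have e3 : pvEq p = false := by simp [pvEq]; omega
        simp [e1, e2, e3]; omega

-- ===== VERDICT (by name: the statement is the Claim_ definition above) =====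
theorem compute_change_spec : Claim_equal_compute_change := by
  unfold Claim_equal_compute_change
  intro data _
  unfold Spec_compute_change compute_change compute_change_alt
  simp only []
  rw [pv_range_count data (· < ·), pv_range_count data (· > ·)]
  cases data with
  | nil => rfl
  | cons x rest =>
      show ((rest.foldl pvStepA (pvStepA (pvDict3 0 0 0, 0, none) x)).1).items = _
      rw [show pvStepA (pvDict3 0 0 0, 0, none) x = (pvDict3 0 0 0, (0 : Int) + 1, some x) by rfl]
      rw [pv_main rest x 0 0 0 0 le_rfl]
      have htri := pv_tri ((x :: rest).zip rest)
      have hlen : ((x :: rest).zip rest).length = rest.length := by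
        simp [List.length_zip]
      unfold pvLt pvGt pvEq at htri ⊢
      simp only [List.tail_cons]
      simp [pvDict3, PySem.Dict.insert, PySem.Dict.empty] at *
      omega
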